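-- pv_equiv track=rewrite | github.com/jlaci/ClientPerformance | analyze/time_window.py | convert_data_set
-- ===== SOURCE A (Python) =====
-- import math
--
-- def convert_data_set(data_set, original_delta, delta):
--     if delta % original_delta != 0:
--         raise Exception('Delta must be the multiple of original delta')
--
--     ratio = int(delta / original_delta)
--     result = [0] * math.ceil(len(data_set) / ratio)
--     for i in range(len(data_set)):
--         result[int(i/ratio)] += data_set[i]
--
--     return result
-- ===== SOURCE B (Python) =====
-- def convert_data_set(data_set, original_delta, delta):
--     if delta % original_delta != 0:
--         raise Exception('Delta must be the multiple of original delta')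
--
--     ratio = int(delta / original_delta)
--     return [sum(data_set[i:i + ratio]) for i in range(0, len(data_set), ratio)]
-- ===== Notes on version B (the rewrite author's own statement) =====
-- stated objective: simpler
-- what changed: A preallocates a zero bucket list of size ceil(n/ratio) and scatters each element into result[int(i/ratio)]; B gathers instead: one slice-sum per chunk start, dropping the preallocation, the index arithmetic and the math import.
import Mathlib
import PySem

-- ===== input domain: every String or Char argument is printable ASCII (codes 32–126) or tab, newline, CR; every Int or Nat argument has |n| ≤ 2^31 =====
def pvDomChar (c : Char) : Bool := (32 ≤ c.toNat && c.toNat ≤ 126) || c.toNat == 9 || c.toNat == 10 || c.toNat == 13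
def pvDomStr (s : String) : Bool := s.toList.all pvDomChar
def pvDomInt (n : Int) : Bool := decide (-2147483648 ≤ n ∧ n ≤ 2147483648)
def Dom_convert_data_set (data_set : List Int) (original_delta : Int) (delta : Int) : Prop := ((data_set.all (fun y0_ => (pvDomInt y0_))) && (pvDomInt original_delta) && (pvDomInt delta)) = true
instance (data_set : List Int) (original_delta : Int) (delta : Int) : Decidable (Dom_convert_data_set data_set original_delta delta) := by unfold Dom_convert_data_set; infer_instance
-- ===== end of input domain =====

-- B replaces A's preallocate-and-scatter (result[int(i/ratio)] += x over element indices) by a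
-- gather over chunk starts: one slice-sum per bucket; same exception guard and ratio; objective: simpler.


-- ===== PORT A =====
-- Literal port of A.  Outside Pre_ the Python raises (ZeroDivisionError / Exception / IndexError);
-- there the total operations below (getD, no-op set out of range) stand in for the raise.
def convert_data_set (data_set : List Int) (original_delta : Int) (delta : Int) : List Int :=
  let ratio : Int := PySem.Int.truncdiv delta original_delta  -- int(delta / original_delta), exact on Dom's range
  -- [0] * math.ceil(len(data_set) / ratio);  ceil(a/b) = -((-a) // b), exact on Dom's range
  let result : List Int := List.replicate (-(PySem.Int.floordiv (-(data_set.length : Int)) ratio)).toNat 0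
  (List.range data_set.length).foldl
    (fun (res : List Int) (i : Nat) =>
      let j := (PySem.Int.truncdiv (i : Int) ratio).toNat      -- int(i / ratio); ≥ 0 on Pre_
      res.set j (res.getD j 0 + data_set.getD i 0))            -- result[j] += data_set[i]; j in range on Pre_
    result

-- ===== PORT B =====
def convert_data_set_alt (data_set : List Int) (original_delta : Int) (delta : Int) : List Int :=
  let ratio : Int := PySem.Int.truncdiv delta original_delta  -- int(delta / original_delta)
  (PySem.List.pyRange 0 (data_set.length : Int) ratio).map
    (fun i => (PySem.List.slice data_set (some i) (some (i + ratio))).sum)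

-- ===== PRECONDITION & SPEC =====
-- Pre_ excludes exactly the inputs where A raises: original_delta = 0 (ZeroDivisionError),
-- delta not a multiple of original_delta (Exception), and a non-positive ratio
-- (ZeroDivisionError when ratio = 0, IndexError when ratio < 0 and the list is nonempty).
def Pre_convert_data_set (data_set : List Int) (original_delta : Int) (delta : Int) : Prop :=
  original_delta ≠ 0 ∧ PySem.Int.mod delta original_delta = 0 ∧
    (0 < PySem.Int.truncdiv delta original_delta ∨
      (data_set = [] ∧ PySem.Int.truncdiv delta original_delta ≠ 0))
instance (data_set : List Int) (original_delta : Int) (delta : Int) : Decidable (Pre_convert_data_set data_set original_delta delta) := by unfold Pre_convert_data_set; infer_instance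

def pvWitness_convert_data_set : List Int × Int × Int := ([1, 2, 3, 4, 5], 1, 2)

def Spec_convert_data_set (data_set : List Int) (original_delta : Int) (delta : Int) (out : List Int) : Prop := out = convert_data_set_alt data_set original_delta delta
instance (data_set : List Int) (original_delta : Int) (delta : Int) (out : List Int) : Decidable (Spec_convert_data_set data_set original_delta delta out) := by unfold Spec_convert_data_set; infer_instance

-- ===== CLAIM (what is proved, stated in full; the proofs are below) =====
def Claim_equal_convert_data_set : Prop := ∀ (data_set : List Int) (original_delta : Int) (delta : Int), Dom_convert_data_set data_set original_delta delta → Pre_convert_data_set data_set original_delta delta → Spec_convert_data_set data_set original_delta delta (convert_data_set data_set original_delta delta)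

-- ===== LEMMAS AND PROOFS =====

-- A's scatter loop, at the Nat level (r = ratio > 0)
def pvStep (r : Nat) (l : List Int) (res : List Int) (i : Nat) : List Int :=
  res.set (i / r) (res.getD (i / r) 0 + l.getD i 0)

def pvA (r : Nat) (l : List Int) : List Int :=
  (List.range l.length).foldl (pvStep r l) (List.replicate ((l.length + r - 1) / r) 0)

-- B's gather, at the Nat level
def pvB (r : Nat) (l : List Int) : List Int :=
  (List.range ((l.length + r - 1) / r)).map (fun k => ((l.drop (k * r)).take r).sum)

theorem pv_truncdiv_natCast (m k : Nat) :
    PySem.Int.truncdiv (m : Int) (k : Int) = ((m / k : Nat) : Int) := by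
  simp [PySem.Int.truncdiv, Int.tdiv]

theorem pv_ceil_cast (n r : Nat) (hr : 0 < r) :
    (-(PySem.Int.floordiv (-(n : Int)) (r : Int))).toNat = (n + r - 1) / r := by
  rcases Nat.eq_zero_or_pos n with rfl | hn
  · rw [show ((0:Nat) + r - 1) / r = 0 from Nat.div_eq_of_lt (by omega)]
    simp [PySem.Int.floordiv, Int.zero_fdiv]
  · have h2 : r * ((n + r - 1) / r) + (n + r - 1) % r = n + r - 1 := Nat.div_add_mod _ _
    have h3 : (n + r - 1) % r < r := Nat.mod_lt _ hr
    have e : (((n + r - 1) / r : Nat) : Int) * (r : Int) = ((r * ((n + r - 1) / r) : Nat) : Int) := by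
      rw [← Int.natCast_mul, Nat.mul_comm]
    have : -(PySem.Int.floordiv (-(n : Int)) (r : Int)) = (((n + r - 1) / r : Nat) : Int) := by
      rw [PySem.Int.neg_floordiv_neg_eq_iff_of_pos (by exact_mod_cast hr)]
      constructor
      · rw [sub_mul, one_mul, e]; omega
      · rw [e]; omega
    rw [this]; exact Int.toNat_natCast _

theorem pv_ceil_rec (n r : Nat) (hr : 0 < r) (hn : 0 < n) :
    (n + r - 1) / r = (n - r + r - 1) / r + 1 := by
  rcases le_or_gt n r with h | h
  · have h1 : n - r = 0 := by omega
    rw [h1, Nat.zero_add]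
    have h2 : (r - 1) / r = 0 := Nat.div_eq_of_lt (by omega)
    rw [h2]
    exact Nat.div_eq_of_lt_le (by omega) (by omega)
  · have : n + r - 1 = (n - r + r - 1) + r := by omega
    rw [this, Nat.add_div_right _ hr]

theorem pv_map_getD_range_take (l : List Int) (k : Nat) (hk : k ≤ l.length) :
    (List.range k).map (fun i => l.getD i 0) = l.take k := by
  induction l generalizing k with
  | nil =>
    have : k = 0 := by simpa using hk
    subst this; simp
  | cons x xs ih =>
    cases k with
    | zero => simp
    | succ j =>
      rw [List.range_succ_eq_map]
      simp only [List.map_cons, List.map_map, List.getD_cons_zero, List.take_succ_cons]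
      congr 1
      rw [← ih j (by simpa using hk)]
      apply List.map_congr_left
      intro i _
      simp

-- indices below r all hit bucket 0
theorem pv_fold_bucket0 (r : Nat) (l : List Int) (idxs : List Nat)
    (h : ∀ i ∈ idxs, i < r) :
    ∀ (a : Int) (rest : List Int),
      idxs.foldl (pvStep r l) (a :: rest) = (a + (idxs.map (fun i => l.getD i 0)).sum) :: rest := by
  induction idxs with
  | nil => intro a rest; simp
  | cons i t ih =>
    intro a rest
    have hi : i / r = 0 := Nat.div_eq_of_lt (h i (by simp))
    simp only [List.foldl_cons, pvStep, hi, List.getD_cons_zero, List.set_cons_zero]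
    rw [ih (fun j hj => h j (by simp [hj]))]
    simp [add_assoc]

-- indices ≥ r leave bucket 0 alone and act shifted on the tail buckets
theorem pv_fold_shift (r : Nat) (hr : 0 < r) (l : List Int) (idxs : List Nat)
    (h : ∀ i ∈ idxs, r ≤ i) :
    ∀ (a : Int) (rest : List Int),
      idxs.foldl (pvStep r l) (a :: rest)
        = a :: (idxs.map (fun i => i - r)).foldl (pvStep r (l.drop r)) rest := by
  induction idxs with
  | nil => intro a rest; simp
  | cons i t ih =>
    intro a rest
    have hri : r ≤ i := h i (by simp)
    have hi : i / r = (i - r) / r + 1 := by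
      have hie : i = (i - r) + r := by omega
      conv_lhs => rw [hie]
      rw [Nat.add_div_right _ hr]
    have hgd : l.getD i 0 = (l.drop r).getD (i - r) 0 := by
      rw [List.getD, List.getD, List.getElem?_drop, show r + (i - r) = i from by omega]
    simp only [List.foldl_cons, pvStep, hi, hgd, List.map_cons,
      List.getD_cons_succ, List.set_cons_succ]
    exact ih (fun j hj => h j (by simp [hj])) a _

-- A's scatter satisfies the chunk recurrence
theorem pvA_rec (r : Nat) (hr : 0 < r) (l : List Int) (hl : l ≠ []) :
    pvA r l = (l.take r).sum :: pvA r (l.drop r) := by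
  have hn : 0 < l.length := List.length_pos_iff.mpr hl
  unfold pvA
  rw [pv_ceil_rec l.length r hr hn]
  have hrep : List.replicate ((l.length - r + r - 1) / r + 1) (0 : Int)
      = (0 : Int) :: List.replicate ((l.length - r + r - 1) / r) 0 := rfl
  rw [hrep]
  rcases le_or_gt l.length r with h | h
  · -- single (possibly partial) chunk: every index hits bucket 0
    have h0 : (l.length - r + r - 1) / r = 0 := by
      have : l.length - r = 0 := by omega
      rw [this]; exact Nat.div_eq_of_lt (by omega)
    rw [h0]
    simp only [List.replicate]
    rw [pv_fold_bucket0 r l _ (fun i hi => by have := List.mem_range.mp hi; omega)]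
    rw [pv_map_getD_range_take l l.length (le_refl _)]
    have hdrop : l.drop r = [] := List.drop_eq_nil_of_le h
    have htake : l.take r = l := List.take_of_length_le h
    simp [hdrop, htake]
    omega
  · -- full first chunk, then the shifted remainder
    have hsplit : List.range l.length = List.range' 0 r ++ List.range' r (l.length - r) := by
      rw [List.range_eq_range']
      have := @List.range'_append 0 r (l.length - r) 1
      simp only [one_mul, zero_add] at this
      conv_lhs => rw [show l.length = r + (l.length - r) from by omega]
      exact this.symm
    rw [hsplit, List.foldl_append]
    have hr0 : List.range' 0 r = List.range r := (List.range_eq_range').symm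
    rw [hr0]
    rw [pv_fold_bucket0 r l _ (fun i hi => List.mem_range.mp hi)]
    rw [pv_map_getD_range_take l r (le_of_lt h)]
    rw [pv_fold_shift r hr l _ (fun i hi => by have := List.mem_range'_1.mp hi; omega)]
    have hmap : (List.range' r (l.length - r)).map (fun i => i - r) = List.range (l.length - r) := by
      rw [List.range'_eq_map_range, List.map_map]
      have hcomp : ((fun i => i - r) ∘ fun x => r + x) = id := by funext x; simp
      rw [hcomp, List.map_id]
    rw [hmap]
    have hlen : (l.drop r).length = l.length - r := List.length_drop
    rw [zero_add, hlen]

-- B's gather satisfies the same chunk recurrence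
theorem pvB_rec (r : Nat) (hr : 0 < r) (l : List Int) (hl : l ≠ []) :
    pvB r l = (l.take r).sum :: pvB r (l.drop r) := by
  have hn : 0 < l.length := List.length_pos_iff.mpr hl
  unfold pvB
  rw [pv_ceil_rec l.length r hr hn, List.range_succ_eq_map, List.map_cons, List.map_map]
  have hlen : (l.drop r).length = l.length - r := List.length_drop
  rw [hlen]
  congr 1
  · norm_num
  · apply List.map_congr_left
    intro k _
    simp only [Function.comp_apply, Nat.succ_eq_add_one]
    congr 2
    rw [List.drop_drop]
    congr 1
    ring_nf

theorem pv_main (r : Nat) (hr : 0 < r) : ∀ (n : Nat) (l : List Int), l.length ≤ n → pvA r l = pvB r l := by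
  intro n
  induction n with
  | zero =>
    intro l hl
    have : l = [] := List.eq_nil_of_length_eq_zero (by omega)
    subst this
    simp [pvA, pvB]
  | succ m ih =>
    intro l hl
    rcases eq_or_ne l [] with rfl | hne
    · simp [pvA, pvB]
    · rw [pvA_rec r hr l hne, pvB_rec r hr l hne]
      congr 1
      exact ih (l.drop r) (by rw [List.length_drop]; omega)

-- A's port equals the Nat-level scatter when ratio = ↑r with r > 0
theorem pv_portA (data_set : List Int) (original_delta delta : Int) (r : Nat) (hr : 0 < r)
    (hratio : PySem.Int.truncdiv delta original_delta = (r : Int)) :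
    convert_data_set data_set original_delta delta = pvA r data_set := by
  unfold convert_data_set pvA pvStep
  rw [hratio]
  simp only [pv_truncdiv_natCast, Int.toNat_natCast, pv_ceil_cast data_set.length r hr]

-- B's port equals the Nat-level gather when ratio = ↑r with r > 0
theorem pv_portB (data_set : List Int) (original_delta delta : Int) (r : Nat) (hr : 0 < r)
    (hratio : PySem.Int.truncdiv delta original_delta = (r : Int)) :
    convert_data_set_alt data_set original_delta delta = pvB r data_set := by
  unfold convert_data_set_alt pvB
  rw [hratio]
  simp only [PySem.List.pyRange_of_pos 0 (data_set.length : Int)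
    (show (0:Int) < (r:Int) by exact_mod_cast hr), List.map_map]
  rcases Nat.eq_zero_or_pos data_set.length with h0 | hpos
  · rw [h0, show ((0:Nat) + r - 1) / r = 0 from Nat.div_eq_of_lt (by omega)]
    norm_num
  · rw [if_pos (show (0:Int) < (data_set.length:Int) by exact_mod_cast hpos)]
    have hcnt : (((data_set.length : Int) - 0 + (r : Int) - 1) / (r : Int)).toNat
        = (data_set.length + r - 1) / r := by
      rw [show ((data_set.length : Int) - 0 + (r : Int) - 1)
            = ((data_set.length + r - 1 : Nat) : Int) from by omega,
          ← Int.natCast_ediv, Int.toNat_natCast]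
    rw [hcnt]
    apply List.map_congr_left
    intro k _
    simp only [Function.comp_apply, zero_add]
    rw [show (r : Int) * ((k : Nat) : Int) = ((r * k : Nat) : Int) from by push_cast; ring,
        show (((r * k : Nat) : Int) + (r : Int)) = ((r * k + r : Nat) : Int) from by push_cast; ring,
        PySem.List.slice_natCast]
    rw [show r * k + r - r * k = r from by omega, Nat.mul_comm r k]

theorem pv_empty (original_delta delta : Int) :
    convert_data_set [] original_delta delta = convert_data_set_alt [] original_delta delta := by
  unfold convert_data_set convert_data_set_alt
  simp [PySem.Int.floordiv, PySem.List.pyRange]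

-- ===== VERDICT (by name: the statement is the Claim_ definition above) =====
theorem convert_data_set_spec : Claim_equal_convert_data_set := by
  intro data_set original_delta delta _ hpre
  obtain ⟨hod, hmod, hdisj⟩ := hpre
  unfold Spec_convert_data_set
  rcases hdisj with hpos | ⟨rfl, _⟩
  · have hcast : PySem.Int.truncdiv delta original_delta
        = (((PySem.Int.truncdiv delta original_delta).toNat : Nat) : Int) :=
      (Int.toNat_of_nonneg (le_of_lt hpos)).symm
    have hrpos : 0 < (PySem.Int.truncdiv delta original_delta).toNat := by omega
    rw [pv_portA data_set original_delta delta _ hrpos hcast,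
        pv_portB data_set original_delta delta _ hrpos hcast]
    exact pv_main _ hrpos data_set.length data_set (le_refl _)
  · exact pv_empty original_delta delta
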